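-- pv_equiv track=rewrite | github.com/agucova/lawful-rtd | sample_prompted_chunks.py | chunk_blocks_with_context
-- ===== SOURCE A (Python) =====
-- from typing import List, Tuple
--
-- def chunk_blocks_with_context(
--     blocks: List[Tuple[str, str]], max_chars=15000
-- ) -> List[Tuple[str, List[str]]]:
--     """
--     We'll produce a list of chunks. Each chunk is a tuple:
--       (context_h1, [block_htmls])
--
--     BUT: multiple blocks might have different contexts. We need to decide how
--     to handle that if a single chunk merges blocks from different <h1> headings.
--
--     Simplest approach: whenever the heading changes, we start a new chunk.
--     That ensures each chunk has a single context heading. Then we also watch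
--     the max_chars limit to avoid too-large chunks.
--
--     This means we can't combine blocks from different <h1>s into a single chunk.
--     If that's acceptable, do it this way. Alternatively, you might incorporate
--     multiple headings in the chunk prompt, but let's keep it simple.
--     """
--     chunks = []
--     current_blocks = []
--     current_len = 0
--     current_context = None
--
--     for (ctx, block_html) in blocks:
--         # If context changed, or if adding block would exceed size, push the current chunk out
--         if ctx != current_context or (current_len + len(block_html) > max_chars):
--             # finalize old chunk
--             if current_blocks:
--                 # store chunk
--                 chunks.append((current_context, current_blocks))
--             # reset
--             current_blocks = [block_html]
--             current_context = ctx
--             current_len = len(block_html)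
--         else:
--             current_blocks.append(block_html)
--             current_len += len(block_html)
--
--     # finalize last chunk
--     if current_blocks:
--         chunks.append((current_context, current_blocks))
--     return chunks
-- ===== SOURCE B (Python) =====
-- from itertools import groupby
-- from typing import List, Tuple
--
-- def chunk_blocks_with_context(
--     blocks: List[Tuple[str, str]], max_chars=15000
-- ) -> List[Tuple[str, List[str]]]:
--     """Partition into maximal runs of equal context, then greedily size-split each run."""
--     chunks = []
--     for ctx, grp in groupby(blocks, key=lambda b: b[0]):
--         htmls = [h for _, h in grp]
--         cur, cur_len = [htmls[0]], len(htmls[0])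
--         for h in htmls[1:]:
--             if cur_len + len(h) > max_chars:
--                 chunks.append((ctx, cur))
--                 cur, cur_len = [h], len(h)
--             else:
--                 cur.append(h)
--                 cur_len += len(h)
--         chunks.append((ctx, cur))
--     return chunks
-- ===== Notes on version B (the rewrite author's own statement) =====
-- stated objective: alternative
-- what changed: A's single stateful scan (chunks/current_blocks/current_len/current_context) is replaced by a two-stage decomposition: first partition the blocks into maximal runs of equal context (itertools.groupby), then greedily size-split each run's htmls, concatenating the resulting (context, htmls) sub-chunks.
import Mathlib
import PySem

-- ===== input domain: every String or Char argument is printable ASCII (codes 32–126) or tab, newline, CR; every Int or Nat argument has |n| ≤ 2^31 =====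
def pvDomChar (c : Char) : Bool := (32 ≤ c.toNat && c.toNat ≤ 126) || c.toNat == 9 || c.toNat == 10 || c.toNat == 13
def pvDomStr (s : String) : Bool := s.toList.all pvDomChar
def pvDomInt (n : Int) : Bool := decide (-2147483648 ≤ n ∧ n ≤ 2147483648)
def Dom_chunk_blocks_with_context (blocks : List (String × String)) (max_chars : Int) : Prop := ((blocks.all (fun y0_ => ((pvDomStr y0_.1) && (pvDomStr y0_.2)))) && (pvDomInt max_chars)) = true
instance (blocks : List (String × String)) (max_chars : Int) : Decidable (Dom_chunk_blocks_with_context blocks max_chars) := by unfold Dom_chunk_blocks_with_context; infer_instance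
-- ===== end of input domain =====

-- B groups the blocks into maximal runs of equal context first and then size-splits each
-- run greedily — a different decomposition, same cost (objective: alternative).

-- ===== PORT A =====
-- A's single loop; state = (chunks, current_blocks, current_len, current_context).
-- current_context is None only while current_blocks = [], so '.getD ""' when finalizing
-- a nonempty chunk is never the default (faithful to A, which never appends None).
def pvAloop (max_chars : Int) (chunks : List (String × List String))
    (cur : List String) (clen : Int) (cctx : Option String) :
    List (String × String) → List (String × List String)
  | [] => if cur ≠ [] then chunks ++ [(cctx.getD "", cur)] else chunks
  | (ctx, html) :: rest =>
    if some ctx ≠ cctx ∨ clen + PySem.Str.len html > max_chars then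
      pvAloop max_chars (if cur ≠ [] then chunks ++ [(cctx.getD "", cur)] else chunks)
        [html] (PySem.Str.len html) (some ctx) rest
    else
      pvAloop max_chars chunks (cur ++ [html]) (clen + PySem.Str.len html) cctx rest

def chunk_blocks_with_context (blocks : List (String × String)) (max_chars : Int) : List (String × List String) :=
  pvAloop max_chars [] [] 0 none blocks

-- ===== PORT B =====
-- maximal runs of consecutive blocks with equal context (itertools.groupby)
def pvRuns : List (String × String) → List (String × List String)
  | [] => []
  | (c, h) :: rest =>
    match pvRuns rest with
    | (c', hs) :: tr => if c = c' then (c, h :: hs) :: tr else (c, [h]) :: (c', hs) :: tr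
    | [] => [(c, [h])]

-- greedy size split of one run's htmls, given the open sub-chunk (cur, clen)
def pvGo (max_chars : Int) (ctx : String) (cur : List String) (clen : Int) :
    List String → List (String × List String)
  | [] => [(ctx, cur)]
  | h :: t =>
    if clen + PySem.Str.len h > max_chars then
      (ctx, cur) :: pvGo max_chars ctx [h] (PySem.Str.len h) t
    else
      pvGo max_chars ctx (cur ++ [h]) (clen + PySem.Str.len h) t

def pvSplitRun (max_chars : Int) : String × List String → List (String × List String)
  | (ctx, hs) =>
    match hs with
    | [] => []
    | h :: t => pvGo max_chars ctx [h] (PySem.Str.len h) t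

def chunk_blocks_with_context_alt (blocks : List (String × String)) (max_chars : Int) : List (String × List String) :=
  (pvRuns blocks).flatMap (pvSplitRun max_chars)

-- ===== PRECONDITION & SPEC =====
def Spec_chunk_blocks_with_context (blocks : List (String × String)) (max_chars : Int) (out : List (String × List String)) : Prop := out = chunk_blocks_with_context_alt blocks max_chars
instance (blocks : List (String × String)) (max_chars : Int) (out : List (String × List String)) : Decidable (Spec_chunk_blocks_with_context blocks max_chars out) := by unfold Spec_chunk_blocks_with_context; infer_instance

-- ===== CLAIM (what is proved, stated in full; the proofs are below) =====
def Claim_equal_chunk_blocks_with_context : Prop := ∀ (blocks : List (String × String)) (max_chars : Int), Dom_chunk_blocks_with_context blocks max_chars → Spec_chunk_blocks_with_context blocks max_chars (chunk_blocks_with_context blocks max_chars)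

-- ===== LEMMAS AND PROOFS =====

-- the tail of A's loop once a nonempty current chunk with context c is open
def pvPend (max_chars : Int) (c : String) (cur : List String) (clen : Int) :
    List (String × String) → List (String × List String)
  | [] => [(c, cur)]
  | (ctx, h) :: t =>
    if ctx = c then
      if clen + PySem.Str.len h > max_chars then
        (c, cur) :: pvPend max_chars c [h] (PySem.Str.len h) t
      else
        pvPend max_chars c (cur ++ [h]) (clen + PySem.Str.len h) t
    else
      (c, cur) :: pvPend max_chars ctx [h] (PySem.Str.len h) t

theorem pvAloop_eq_pend (max_chars : Int) (rest : List (String × String)) :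
    ∀ (chunks : List (String × List String)) (c : String) (cur : List String) (clen : Int),
      cur ≠ [] →
      pvAloop max_chars chunks cur clen (some c) rest = chunks ++ pvPend max_chars c cur clen rest := by
  induction rest with
  | nil => intro chunks c cur clen hne; simp [pvAloop, pvPend, hne]
  | cons b t ih =>
    intro chunks c cur clen hne
    obtain ⟨ctx, h⟩ := b
    rw [pvAloop, pvPend]
    by_cases hc : ctx = c
    · subst hc
      by_cases hs : clen + PySem.Str.len h > max_chars
      · rw [if_pos (Or.inr hs), if_pos rfl, if_pos hs, if_pos hne,
          ih _ _ _ _ (by simp)]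
        simp [List.append_assoc]
      · rw [if_neg (by simpa using hs), if_pos rfl, if_neg hs]
        exact ih _ _ _ _ (by simp)
    · rw [if_pos (Or.inl (by simpa using hc)), if_neg hc, if_pos hne,
        ih _ _ _ _ (by simp)]
      simp [List.append_assoc]

theorem pvPend_eq_runs (max_chars : Int) (rest : List (String × String)) :
    ∀ (c : String) (cur : List String) (clen : Int),
      pvPend max_chars c cur clen rest =
        (match pvRuns rest with
         | [] => [(c, cur)]
         | (c', hs) :: tr =>
           if c = c' then pvGo max_chars c cur clen hs ++ tr.flatMap (pvSplitRun max_chars)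
           else (c, cur) :: ((c', hs) :: tr).flatMap (pvSplitRun max_chars)) := by
  induction rest with
  | nil => intro c cur clen; simp [pvPend, pvRuns]
  | cons b t ih =>
    intro c cur clen
    obtain ⟨ctx, h⟩ := b
    rw [pvPend]
    by_cases hc : ctx = c
    · subst hc
      rw [if_pos rfl]
      by_cases hs : clen + PySem.Str.len h > max_chars
      · rw [if_pos hs, ih]
        simp at hs
        cases hr : pvRuns t with
        | nil => simp [pvRuns, hr, pvGo, pvSplitRun, hs]
        | cons r tr =>
          obtain ⟨c', hs'⟩ := r
          by_cases hcc : ctx = c'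
          · subst hcc; simp [pvRuns, hr, pvGo, pvSplitRun, hs]
          · simp [pvRuns, hr, pvGo, pvSplitRun, hs, hcc]
      · rw [if_neg hs, ih]
        simp at hs
        have hs2 : ¬ max_chars < clen + (h.length : Int) := by omega
        cases hr : pvRuns t with
        | nil => simp [pvRuns, hr, pvGo, pvSplitRun, hs, hs2]
        | cons r tr =>
          obtain ⟨c', hs'⟩ := r
          by_cases hcc : ctx = c'
          · subst hcc; simp [pvRuns, hr, pvGo, pvSplitRun, hs, hs2]
          · simp [pvRuns, hr, pvGo, pvSplitRun, hs, hs2, hcc]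
    · rw [if_neg hc, ih]
      cases hr : pvRuns t with
      | nil => simp [pvRuns, hr, pvGo, pvSplitRun, Ne.symm hc]
      | cons r tr =>
        obtain ⟨c', hs'⟩ := r
        by_cases hcc : ctx = c'
        · subst hcc; simp [pvRuns, hr, pvGo, pvSplitRun, Ne.symm hc]
        · simp [pvRuns, hr, pvGo, pvSplitRun, Ne.symm hc, hcc]

-- ===== VERDICT (by name: the statement is the Claim_ definition above) =====
theorem chunk_blocks_with_context_spec : Claim_equal_chunk_blocks_with_context := by
  intro blocks max_chars _
  unfold Spec_chunk_blocks_with_context chunk_blocks_with_context chunk_blocks_with_context_alt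
  cases blocks with
  | nil => simp [pvAloop, pvRuns]
  | cons b t =>
    obtain ⟨c, h⟩ := b
    rw [pvAloop, if_pos (Or.inl (by simp)),
      if_neg (by simp : ¬ (([] : List String) ≠ [])),
      pvAloop_eq_pend max_chars t [] c [h] (PySem.Str.len h) (by simp),
      pvPend_eq_runs]
    cases hr : pvRuns t with
    | nil => simp [pvRuns, hr, pvSplitRun, pvGo]
    | cons r tr =>
      obtain ⟨c', hs'⟩ := r
      by_cases hcc : c = c'
      · subst hcc; simp [pvRuns, hr, pvSplitRun]
      · simp [pvRuns, hr, pvSplitRun, pvGo, hcc]
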